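-- pv_equiv track=rewrite | github.com/mhartkhiss/speakforge-capstone2 | server/core/views/context_helpers.py | clean_translation_response
-- ===== SOURCE A (Python) =====
-- def clean_translation_response(response, original_text):
--     """Clean AI response to extract only the translation"""
--
--     # Remove common system prompt indicators
--     indicators_to_remove = [
--         "You are a direct translator",
--         "Human:",
--         "# noobyco/test",
--         "CONVERSATION CONTEXT:",
--         "IMPORTANT TRANSLATION GUIDELINES:",
--         "Now translate the following text",
--         "Output ONLY the translation",
--         "Speaker A:",
--         "Speaker B:"
--     ]
--
--     # Split response into lines
--     lines = response.split('\n')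
--     cleaned_lines = []
--
--     skip_line = False
--     for line in lines:
--         line = line.strip()
--
--         # Skip empty lines
--         if not line:
--             continue
--
--         # Skip lines that contain system prompt indicators
--         if any(indicator in line for indicator in indicators_to_remove):
--             skip_line = True
--             continue
--
--         # Skip lines that look like context (Speaker A/B format)
--         if line.startswith(('Speaker A:', 'Speaker B:')):
--             continue
--
--         # Skip lines that are clearly system instructions
--         if line.startswith(('- If', '- Consider', '- Maintain', '- Preserve')):
--             continue
--
--         # If we find what looks like the actual translation, keep it
--         if not skip_line and line:
--             cleaned_lines.append(line)
--
--     # Join cleaned lines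
--     cleaned_response = ' '.join(cleaned_lines)
--
--     # If the cleaned response is too long compared to original, it might still contain prompt
--     if len(cleaned_response) > len(original_text) * 5:
--         # Try to find the shortest meaningful line that could be the translation
--         shortest_meaningful = min(
--             [line for line in lines if line.strip() and len(line.strip()) > 3],
--             key=len,
--             default=cleaned_response
--         )
--
--         # Check if this shortest line doesn't contain system indicators
--         if not any(indicator in shortest_meaningful for indicator in indicators_to_remove):
--             cleaned_response = shortest_meaningful.strip()
--
--     return cleaned_response if cleaned_response else response
-- ===== SOURCE B (Python) =====
-- _INDICATORS = [
--     "You are a direct translator",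
--     "Human:",
--     "# noobyco/test",
--     "CONVERSATION CONTEXT:",
--     "IMPORTANT TRANSLATION GUIDELINES:",
--     "Now translate the following text",
--     "Output ONLY the translation",
--     "Speaker A:",
--     "Speaker B:",
-- ]
--
-- _DASHES = ('- If', '- Consider', '- Maintain', '- Preserve')
--
--
-- def _first_hit(ind, stripped):
--     """Index of the first stripped line containing indicator `ind` (len if none)."""
--     for i, l in enumerate(stripped):
--         if ind in l:
--             return i
--     return len(stripped)
--
--
-- def clean_translation_response(response, original_text):
--     """Clean AI response to extract only the translation.
--
--     Inverted traversal: instead of scanning lines and testing each against all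
--     indicators with a sticky skip flag, scan each INDICATOR for its first
--     occurrence line, cut the line list at the earliest such index (the sticky
--     flag means nothing after that point survives anyway), and filter the kept
--     slice.  Lines beginning with 'Speaker A:'/'Speaker B:' need no separate
--     check: those prefixes are themselves indicators.
--     """
--     stripped = [l.strip() for l in response.split('\n')]
--     cut = min(_first_hit(ind, stripped) for ind in _INDICATORS)
--     kept = [l for l in stripped[:cut] if l and not l.startswith(_DASHES)]
--     cleaned = ' '.join(kept)
--
--     if len(cleaned) > len(original_text) * 5:
--         # shortest original line longer than 3 once stripped (nonempty is implied)
--         shortest = min((l for l in response.split('\n') if len(l.strip()) > 3),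
--                        key=len, default=cleaned)
--         if all(ind not in shortest for ind in _INDICATORS):
--             cleaned = shortest.strip()
--
--     return cleaned if cleaned else response
-- ===== Notes on version B (the rewrite author's own statement) =====
-- stated objective: alternative
-- what changed: A's single pass over lines with a sticky skip flag is replaced by an inverted traversal: for each indicator find the first line containing it, cut the stripped line list at the minimum such index (sticky flag = nothing after it survives), filter the kept slice; the Speaker-A/B startswith branch disappears because those prefixes are themselves indicators, and the fallback filter drops the redundant nonempty test.
import Mathlib
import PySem

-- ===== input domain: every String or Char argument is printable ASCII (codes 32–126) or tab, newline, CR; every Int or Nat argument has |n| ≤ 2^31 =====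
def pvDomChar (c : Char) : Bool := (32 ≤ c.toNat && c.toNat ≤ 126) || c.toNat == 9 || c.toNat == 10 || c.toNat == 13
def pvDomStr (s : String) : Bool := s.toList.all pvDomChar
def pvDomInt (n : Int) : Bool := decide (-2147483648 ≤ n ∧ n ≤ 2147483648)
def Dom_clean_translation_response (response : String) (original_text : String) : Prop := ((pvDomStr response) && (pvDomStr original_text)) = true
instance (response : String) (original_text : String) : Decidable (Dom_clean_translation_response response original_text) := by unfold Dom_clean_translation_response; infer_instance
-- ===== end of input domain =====

-- B inverts the traversal: for each indicator it finds the first line containing it, cuts the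
-- stripped line list at the minimum such index, and filters the kept slice (objective: alternative; same cost).


-- shared constant: the indicator list (a literal in both Pythons)
def pvIndicators : List String :=
  ["You are a direct translator", "Human:", "# noobyco/test", "CONVERSATION CONTEXT:",
   "IMPORTANT TRANSLATION GUIDELINES:", "Now translate the following text",
   "Output ONLY the translation", "Speaker A:", "Speaker B:"]

-- response.split('\n')  (sep is nonempty, so split? is some)
def pvSplitLines (s : String) : List String := (PySem.Str.split? s "\n").getD []

-- ===== PORT A =====
-- any(indicator in line for indicator in indicators_to_remove)
def pvHasInd (line : String) : Bool := pvIndicators.any (fun ind => PySem.Str.isIn ind line)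

-- A's for-loop with the sticky skip_line flag and the cleaned_lines accumulator
def pvLoopA : List String → Bool → List String → List String
  | [], _, acc => acc
  | l :: rest, skip, acc =>
    let line := PySem.Str.strip l
    if line == "" then pvLoopA rest skip acc
    else if pvHasInd line then pvLoopA rest true acc
    else if PySem.Str.startswith line "Speaker A:" || PySem.Str.startswith line "Speaker B:" then
      pvLoopA rest skip acc
    else if PySem.Str.startswith line "- If" || PySem.Str.startswith line "- Consider" ||
            PySem.Str.startswith line "- Maintain" || PySem.Str.startswith line "- Preserve" then
      pvLoopA rest skip acc
    else if !skip then pvLoopA rest skip (acc ++ [line])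
    else pvLoopA rest skip acc

def clean_translation_response (response : String) (original_text : String) : String :=
  let lines := pvSplitLines response
  let cleaned_lines := pvLoopA lines false []
  let cleaned := PySem.Str.join " " cleaned_lines
  let cleaned2 :=
    if PySem.Str.len cleaned > PySem.Str.len original_text * 5 then
      let shortest := PySem.List.minD
        (lines.filter (fun l => !(PySem.Str.strip l == "") && decide (PySem.Str.len (PySem.Str.strip l) > 3)))
        PySem.Str.len cleaned
      if !(pvHasInd shortest) then PySem.Str.strip shortest else cleaned
    else cleaned
  if cleaned2 == "" then response else cleaned2

-- ===== PORT B =====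
-- _first_hit: index of the first stripped line containing `ind` (length if none)
def pvFirstHit (ind : String) : List String → Nat
  | [] => 0
  | l :: rest => if PySem.Str.isIn ind l then 0 else pvFirstHit ind rest + 1

-- lines starting with the instruction dashes (_DASHES startswith test)
def pvDash (line : String) : Bool :=
  PySem.Str.startswith line "- If" || PySem.Str.startswith line "- Consider" ||
  PySem.Str.startswith line "- Maintain" || PySem.Str.startswith line "- Preserve"

def clean_translation_response_alt (response : String) (original_text : String) : String :=
  let stripped := (pvSplitLines response).map PySem.Str.strip
  let cut := (PySem.List.min? (pvIndicators.map (fun ind => pvFirstHit ind stripped)) (fun x => x)).getD 0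
  let kept := (stripped.take cut).filter (fun l => !(l == "") && !pvDash l)
  let cleaned := PySem.Str.join " " kept
  let cleaned2 :=
    if PySem.Str.len cleaned > PySem.Str.len original_text * 5 then
      let shortest := PySem.List.minD
        ((pvSplitLines response).filter (fun l => decide (PySem.Str.len (PySem.Str.strip l) > 3)))
        PySem.Str.len cleaned
      if pvIndicators.all (fun ind => !PySem.Str.isIn ind shortest) then PySem.Str.strip shortest
      else cleaned
    else cleaned
  if cleaned2 == "" then response else cleaned2

-- ===== PRECONDITION & SPEC =====
def Spec_clean_translation_response (response : String) (original_text : String) (out : String) : Prop := out = clean_translation_response_alt response original_text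
instance (response : String) (original_text : String) (out : String) : Decidable (Spec_clean_translation_response response original_text out) := by unfold Spec_clean_translation_response; infer_instance

-- ===== CLAIM (what is proved, stated in full; the proofs are below) =====
def Claim_equal_clean_translation_response : Prop := ∀ (response : String) (original_text : String), Dom_clean_translation_response response original_text → Spec_clean_translation_response response original_text (clean_translation_response response original_text)

-- ===== LEMMAS AND PROOFS =====

-- once skip_line is True, nothing is ever appended
lemma pvLoopA_true (lines : List String) (acc : List String) :
    pvLoopA lines true acc = acc := by
  induction lines generalizing acc with
  | nil => rfl
  | cons l rest ih =>
    simp only [pvLoopA]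
    split_ifs <;> first | apply ih | simp_all

-- a line that starts with p contains p
lemma pvStartswith_isIn (l p : String) (h : PySem.Str.startswith l p = true) :
    PySem.Str.isIn p l = true := by
  rw [PySem.Str.isIn_iff_infix]
  have := (PySem.Chars.startswith_iff l.toList p.toList).mp (by simpa using h)
  exact this.isInfix

-- the sticky loop from skip = False keeps exactly: the filtered prefix before the first indicator line
set_option maxHeartbeats 1000000 in
lemma pvLoopA_eq (lines : List String) (acc : List String) :
    pvLoopA lines false acc
      = acc ++ ((lines.map PySem.Str.strip).takeWhile (fun l => !pvHasInd l)).filter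
          (fun l => !(l == "") && !pvDash l) := by
  induction lines generalizing acc with
  | nil => simp [pvLoopA]
  | cons l rest ih =>
    simp only [pvLoopA, List.map_cons, List.takeWhile_cons]
    cases h1 : (PySem.Str.strip l == "") with
    | true =>
      have hl : PySem.Str.strip l = "" := by simpa using h1
      have hInd : pvHasInd "" = false := by decide
      simp [hInd, hl, ih]
    | false =>
      cases h2 : pvHasInd (PySem.Str.strip l) with
      | true => simp [pvLoopA_true]
      | false =>
        have hA : PySem.Str.startswith (PySem.Str.strip l) "Speaker A:" = false := by
          cases h : PySem.Str.startswith (PySem.Str.strip l) "Speaker A:" with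
          | false => rfl
          | true =>
            exfalso
            have h' := pvStartswith_isIn _ _ h
            simp at h'
            have hi : pvHasInd (PySem.Str.strip l) = true := by
              simp [pvHasInd, pvIndicators]
              exact Or.inr (Or.inr (Or.inr (Or.inr (Or.inr (Or.inr (Or.inr (Or.inl h')))))))
            rw [h2] at hi; cases hi
        have hB : PySem.Str.startswith (PySem.Str.strip l) "Speaker B:" = false := by
          cases h : PySem.Str.startswith (PySem.Str.strip l) "Speaker B:" with
          | false => rfl
          | true =>
            exfalso
            have h' := pvStartswith_isIn _ _ h
            simp at h'
            have hi : pvHasInd (PySem.Str.strip l) = true := by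
              simp [pvHasInd, pvIndicators]
              exact Or.inr (Or.inr (Or.inr (Or.inr (Or.inr (Or.inr (Or.inr (Or.inr h')))))))
            rw [h2] at hi; cases hi
        cases h4 : pvDash (PySem.Str.strip l) with
        | true =>
          have h4' := h4
          unfold pvDash at h4'
          simp only [hA, hB, h4', Bool.or_self]
          simp [List.filter_cons, ih]
          exact fun _ => h4
        | false =>
          have h4' := h4
          unfold pvDash at h4'
          simp only [hA, hB, h4', Bool.or_self]
          simp [h1, h4, ih]

-- pvFirstHit is findIdx of the containment test
lemma pvFirstHit_eq (ind : String) (xs : List String) :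
    pvFirstHit ind xs = xs.findIdx (fun l => PySem.Str.isIn ind l) := by
  induction xs with
  | nil => rfl
  | cons x t ih =>
    by_cases h : PySem.Str.isIn ind x = true <;>
      simp [pvFirstHit, List.findIdx_cons, ih]

-- fold-min bounds
lemma pvFoldlMin_le_init (l : List Nat) (a : Nat) : l.foldl min a ≤ a := by
  induction l generalizing a with
  | nil => simp
  | cons y t ih => exact le_trans (ih (min a y)) (Nat.min_le_left _ _)

lemma pvFoldlMin_le (l : List Nat) (a : Nat) : ∀ x ∈ l, l.foldl min a ≤ x := by
  induction l generalizing a with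
  | nil => simp
  | cons y t ih =>
    intro x hx
    rcases List.mem_cons.mp hx with rfl | hx
    · calc t.foldl min (min a x) ≤ min a x := pvFoldlMin_le_init t _
      _ ≤ x := Nat.min_le_right _ _
    · exact ih (min a y) x hx

lemma pvLe_foldlMin (l : List Nat) (a c : Nat) (h : ∀ x ∈ l, c ≤ x) (ha : c ≤ a) :
    c ≤ l.foldl min a := by
  induction l generalizing a with
  | nil => simpa
  | cons y t ih =>
    exact ih (min a y) (fun x hx => h x (List.mem_cons_of_mem _ hx))
      (le_min ha (h y (List.mem_cons_self)))

-- findIdx is antitone under predicate implication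
lemma pvFindIdx_mono {α : Type} (p q : α → Bool) (xs : List α)
    (h : ∀ x, p x = true → q x = true) : xs.findIdx q ≤ xs.findIdx p := by
  induction xs with
  | nil => simp
  | cons x t ih =>
    simp only [List.findIdx_cons]
    cases hq : q x with
    | true => simp
    | false =>
      have hp : p x = false := by
        cases hpx : p x with
        | false => rfl
        | true => rw [h x hpx] at hq; cases hq
      simp [hp]; omega

lemma pvFindIdx_le_of_getElem {α : Type} (p : α → Bool) (xs : List α) (j : Nat)
    (hj : j < xs.length) (h : p xs[j] = true) : xs.findIdx p ≤ j := by
  induction xs generalizing j with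
  | nil => simp at hj
  | cons x t ih =>
    simp only [List.findIdx_cons]
    cases hx : p x with
    | true => simp
    | false =>
      cases j with
      | zero => simp at h; rw [h] at hx; cases hx
      | succ k =>
        simp only [Bool.cond_false]
        have := ih k (by simpa using hj) (by simpa using h)
        omega

-- B's cut index is the index of the first indicator-bearing line
lemma pvCut_eq (xs : List String) :
    (PySem.List.min? (pvIndicators.map (fun ind => pvFirstHit ind xs)) (fun x => x)).getD 0
      = xs.findIdx pvHasInd := by
  have himpl : ∀ ind ∈ pvIndicators, ∀ l, PySem.Str.isIn ind l = true → pvHasInd l = true := by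
    intro ind hind l hl
    exact List.any_eq_true.mpr ⟨ind, hind, hl⟩
  simp only [pvIndicators, List.map_cons, List.map_nil] at *
  rw [PySem.List.min?_id_cons]
  simp only [Option.getD_some]
  apply Nat.le_antisymm
  · -- fold min ≤ findIdx pvHasInd
    by_cases hlt : xs.findIdx pvHasInd < xs.length
    · have hp : pvHasInd xs[xs.findIdx pvHasInd] = true := List.findIdx_getElem
      obtain ⟨ind, hmem, hin⟩ := List.any_eq_true.mp hp
      have hfind : pvFirstHit ind xs ≤ xs.findIdx pvHasInd := by
        rw [pvFirstHit_eq]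
        exact pvFindIdx_le_of_getElem _ xs _ hlt hin
      fin_cases hmem <;>
        first
          | exact le_trans (pvFoldlMin_le_init _ _) hfind
          | exact le_trans (pvFoldlMin_le _ _ _ (by simp)) hfind
    · have hlen : xs.findIdx pvHasInd = xs.length := by
        have := List.findIdx_le_length (p := pvHasInd) (xs := xs); omega
      rw [hlen]
      exact le_trans (pvFoldlMin_le_init _ _) (by rw [pvFirstHit_eq]; exact List.findIdx_le_length)
  · -- findIdx pvHasInd ≤ fold min
    apply pvLe_foldlMin
    · intro x hx
      simp only [List.mem_cons, List.not_mem_nil, or_false] at hx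
      rcases hx with h|h|h|h|h|h|h|h <;>
        (rw [h, pvFirstHit_eq]; exact pvFindIdx_mono _ _ xs (himpl _ (by simp)))
    · rw [pvFirstHit_eq]; exact pvFindIdx_mono _ _ xs (himpl _ (by simp))

-- take-up-to-first-hit is the takeWhile of the negated predicate
lemma pvTake_findIdx {α : Type} (p : α → Bool) (xs : List α) :
    xs.take (xs.findIdx p) = xs.takeWhile (fun x => !p x) := by
  induction xs with
  | nil => simp
  | cons x t ih =>
    simp only [List.findIdx_cons, List.takeWhile_cons]
    cases hx : p x with
    | true => simp
    | false => simp [ih]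

-- the fallback candidate filters agree: len(strip l) > 3 already implies strip l ≠ ""
lemma pvCandFilter_eq (lines : List String) :
    lines.filter (fun l => !(PySem.Str.strip l == "") && decide (PySem.Str.len (PySem.Str.strip l) > 3))
      = lines.filter (fun l => decide (PySem.Str.len (PySem.Str.strip l) > 3)) := by
  apply List.filter_congr
  intro l _
  cases h : (decide (PySem.Str.len (PySem.Str.strip l) > 3)) with
  | false => simp
  | true =>
    have h3 : PySem.Str.len (PySem.Str.strip l) > 3 := of_decide_eq_true h
    have hne : ¬ (PySem.Str.strip l = "") := by
      intro he; rw [he] at h3; simp [PySem.Str.len] at h3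
    simp [hne]

-- all(ind not in s) is the negation of any(ind in s)
lemma pvAllNot_eq (s : String) :
    (pvIndicators.all (fun ind => !PySem.Str.isIn ind s)) = !pvHasInd s := by
  simp [pvHasInd, List.all_eq_not_any_not]

-- ===== VERDICT (by name: the statement is the Claim_ definition above) =====
theorem clean_translation_response_spec : Claim_equal_clean_translation_response := by
  intro response original_text _
  unfold Spec_clean_translation_response clean_translation_response clean_translation_response_alt
  simp only [pvLoopA_eq, List.nil_append, pvCut_eq, pvTake_findIdx, pvCandFilter_eq, pvAllNot_eq]
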